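-- pv_equiv track=rewrite | github.com/SegataLab/lefse | lefsebiom/AbundanceTable.py | funcGetTerminalNodesFromList
-- ===== SOURCE A (Python) =====
-- def funcGetTerminalNodesFromList(lsNames,cNameDelimiter):
--     """
--     Returns the terminal nodes given the current feature names in the abundance table. The
--     features must contain a consensus lineage or all will be returned.
--
--     :param    lsNames:    The list of string names to parse and filter.
--     :type:    List of strings
--     :param    cNameDelimiter:    The delimiter for the name of the features.
--     :type:    Character    Delimiter
--     :return list:    A list of terminal elements in the list (given only the list).
--     """
--
--     #Build hash
--     dictCounts = dict()
--     for strTaxaName in lsNames: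
--         #Split into the elements of the clades
--         lsClades = list(filter(None,strTaxaName.split(cNameDelimiter)))
--         #Count clade levels
--         iCladeLength = len(lsClades)
--
--         #Evaluate first element
--         sClade = lsClades[0]
--         dictCounts[sClade] = sClade not in dictCounts
--
--         #Evaluate the rest of the elements
--         if iCladeLength < 2:
--             continue
--         for iIndex in range(1,iCladeLength):
--             prevClade = sClade
--             sClade = cNameDelimiter.join([sClade,lsClades[iIndex]])
--             if sClade in dictCounts:
--                 dictCounts[sClade] = dictCounts[prevClade] = False
--             else:
--                 dictCounts[sClade] = True
--                 dictCounts[prevClade] = False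
--
--     #Return only the elements that were of count 1
--     return list(filter( lambda s: dictCounts[s] == True, dictCounts ))
-- ===== SOURCE B (Python) =====
-- def funcGetTerminalNodesFromList(lsNames, cNameDelimiter):
--     # One pass: counts[prefix] = #names having that prefix (first-seen order),
--     # parents = set of prefixes that have a child; terminal = counted once and never a parent.
--     counts = {}
--     parents = set()
--     for name in lsNames:
--         clades = [c for c in name.split(cNameDelimiter) if c]
--         cur = clades[0]
--         prefixes = [cur]
--         for c in clades[1:]:
--             cur = cNameDelimiter.join([cur, c])
--             prefixes.append(cur)
--         for p in prefixes:
--             counts[p] = counts.get(p, 0) + 1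
--         for p in prefixes[:-1]:
--             parents.add(p)
--     return [p for p in counts if counts[p] == 1 and p not in parents]
-- ===== Notes on version B (the rewrite author's own statement) =====
-- stated objective: alternative
-- what changed: Instead of A's dict of toggled booleans rewritten by a stateful pairwise inner loop, B builds each name's progressive prefix list once and maintains a counts dict (prefix -> number of names containing it, first-seen order) plus a parents set (every non-deepest prefix), returning the prefixes counted once that are never parents.
import Mathlib
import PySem

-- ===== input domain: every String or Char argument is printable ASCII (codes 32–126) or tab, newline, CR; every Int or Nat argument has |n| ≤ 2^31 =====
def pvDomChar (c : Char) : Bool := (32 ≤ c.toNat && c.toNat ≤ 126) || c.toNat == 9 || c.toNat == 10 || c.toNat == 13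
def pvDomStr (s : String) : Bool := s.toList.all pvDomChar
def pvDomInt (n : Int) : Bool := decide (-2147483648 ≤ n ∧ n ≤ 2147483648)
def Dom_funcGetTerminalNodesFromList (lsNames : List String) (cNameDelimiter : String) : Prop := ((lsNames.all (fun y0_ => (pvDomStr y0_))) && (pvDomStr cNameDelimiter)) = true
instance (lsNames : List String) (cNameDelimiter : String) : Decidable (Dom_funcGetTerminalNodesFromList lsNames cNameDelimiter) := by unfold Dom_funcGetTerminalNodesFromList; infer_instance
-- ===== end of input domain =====

-- B replaces A's toggled-boolean dict with a counts dict + parents set over the same prefix lists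
-- (alternative decomposition, same cost); equivalence of the RETURN value is proved on Pre_.

-- ===== PORT A =====
def funcGetTerminalNodesFromList (lsNames : List String) (cNameDelimiter : String) : List String :=
  let dictCounts : PySem.Dict String Bool :=
    lsNames.foldl (fun dictCounts strTaxaName =>
      let lsClades := ((PySem.Str.split? strTaxaName cNameDelimiter).getD []).filter (fun s => s ≠ "")
      let iCladeLength : Int := (lsClades.length : Int)
      let sClade := PySem.List.pyGetD lsClades 0 ""   -- lsClades[0]; IndexError excluded by Pre_
      let dictCounts := dictCounts.insert sClade (!dictCounts.contains sClade)
      if iCladeLength < 2 then dictCounts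
      else ((PySem.List.pyRange 1 iCladeLength 1).foldl
        (fun (st : String × PySem.Dict String Bool) iIndex =>
          let prevClade := st.1
          let sClade := PySem.Str.join cNameDelimiter [st.1, PySem.List.pyGetD lsClades iIndex ""]
          if st.2.contains sClade then (sClade, (st.2.insert sClade false).insert prevClade false)
          else (sClade, (st.2.insert sClade true).insert prevClade false))
        (sClade, dictCounts)).2)
      PySem.Dict.empty
  dictCounts.keys.filter (fun s => dictCounts.getD s false == true)

-- ===== PORT B =====
def funcGetTerminalNodesFromList_alt (lsNames : List String) (cNameDelimiter : String) : List String :=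
  let st : PySem.Dict String Int × PySem.Set String :=
    lsNames.foldl (fun st name =>
      let clades := ((PySem.Str.split? name cNameDelimiter).getD []).filter (fun c => c ≠ "")
      let cur := PySem.List.pyGetD clades 0 ""       -- clades[0]; IndexError excluded by Pre_
      let r := (PySem.List.slice clades (some 1) none).foldl
        (fun (st : String × List String) c =>
          let cur := PySem.Str.join cNameDelimiter [st.1, c]
          (cur, st.2 ++ [cur]))
        (cur, [cur])
      let prefixes := r.2
      let counts := prefixes.foldl (fun d p => d.modify p 0 (· + 1)) st.1
      let parents := PySem.Set.update st.2 (PySem.List.slice prefixes none (some (-1)))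
      (counts, parents))
      (PySem.Dict.empty, PySem.Set.empty)
  st.1.keys.filter (fun p => st.1.getD p 0 == 1 && !(st.2.contains p))

-- ===== PRECONDITION & SPEC =====
-- Pre_ excludes exactly the inputs where the Python A raises: an empty delimiter with a nonempty
-- name list (ValueError from str.split) and any name whose split has no nonempty piece (IndexError).
def Pre_funcGetTerminalNodesFromList (lsNames : List String) (cNameDelimiter : String) : Prop :=
  lsNames = [] ∨ (cNameDelimiter ≠ "" ∧ ∀ name ∈ lsNames,
    ((PySem.Str.split? name cNameDelimiter).getD []).filter (fun c => c ≠ "") ≠ [])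
instance (lsNames : List String) (cNameDelimiter : String) : Decidable (Pre_funcGetTerminalNodesFromList lsNames cNameDelimiter) := by unfold Pre_funcGetTerminalNodesFromList; infer_instance

def pvWitness_funcGetTerminalNodesFromList : List String × String := (["A|B", "A|C", "D"], "|")

def Spec_funcGetTerminalNodesFromList (lsNames : List String) (cNameDelimiter : String) (out : List String) : Prop := out = funcGetTerminalNodesFromList_alt lsNames cNameDelimiter
instance (lsNames : List String) (cNameDelimiter : String) (out : List String) : Decidable (Spec_funcGetTerminalNodesFromList lsNames cNameDelimiter out) := by unfold Spec_funcGetTerminalNodesFromList; infer_instance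

-- ===== CLAIM (what is proved, stated in full; the proofs are below) =====
def Claim_equal_funcGetTerminalNodesFromList : Prop := ∀ (lsNames : List String) (cNameDelimiter : String), Dom_funcGetTerminalNodesFromList lsNames cNameDelimiter → Pre_funcGetTerminalNodesFromList lsNames cNameDelimiter → Spec_funcGetTerminalNodesFromList lsNames cNameDelimiter (funcGetTerminalNodesFromList lsNames cNameDelimiter)


-- ===== LEMMAS AND PROOFS =====

-- The progressive prefix list of one name's clade list (head clade `cur`, remaining clades `rest`).
def ppfx (d : String) (cur : String) : List String → List String
  | [] => [cur]
  | c :: rest => cur :: ppfx d (PySem.Str.join d [cur, c]) rest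

-- Its deepest (last) prefix.
def lastP (d : String) (cur : String) : List String → String
  | [] => cur
  | c :: rest => lastP d (PySem.Str.join d [cur, c]) rest

-- Proof-side names for the two ports' loop bodies (definitionally the ports' lambdas).
def cladesOf (dl name : String) : List String :=
  ((PySem.Str.split? name dl).getD []).filter (fun c => c ≠ "")

def headCl (dl name : String) : String := PySem.List.pyGetD (cladesOf dl name) 0 ""

def psOf (dl name : String) : List String := ppfx dl (headCl dl name) ((cladesOf dl name).drop 1)

def lastOf (dl name : String) : String := lastP dl (headCl dl name) ((cladesOf dl name).drop 1)

def aInner (dl : String) (st : String × PySem.Dict String Bool) (c : String) :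
    String × PySem.Dict String Bool :=
  let prevClade := st.1
  let sClade := PySem.Str.join dl [st.1, c]
  if st.2.contains sClade then (sClade, (st.2.insert sClade false).insert prevClade false)
  else (sClade, (st.2.insert sClade true).insert prevClade false)

def aStep (dl : String) (dictCounts : PySem.Dict String Bool) (strTaxaName : String) :
    PySem.Dict String Bool :=
  let lsClades := ((PySem.Str.split? strTaxaName dl).getD []).filter (fun s => s ≠ "")
  let iCladeLength : Int := (lsClades.length : Int)
  let sClade := PySem.List.pyGetD lsClades 0 ""
  let dictCounts := dictCounts.insert sClade (!dictCounts.contains sClade)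
  if iCladeLength < 2 then dictCounts
  else ((PySem.List.pyRange 1 iCladeLength 1).foldl
    (fun (st : String × PySem.Dict String Bool) iIndex =>
      let prevClade := st.1
      let sClade := PySem.Str.join dl [st.1, PySem.List.pyGetD lsClades iIndex ""]
      if st.2.contains sClade then (sClade, (st.2.insert sClade false).insert prevClade false)
      else (sClade, (st.2.insert sClade true).insert prevClade false))
    (sClade, dictCounts)).2

def bStep (dl : String) (st : PySem.Dict String Int × PySem.Set String) (name : String) :
    PySem.Dict String Int × PySem.Set String :=
  let clades := ((PySem.Str.split? name dl).getD []).filter (fun c => c ≠ "")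
  let cur := PySem.List.pyGetD clades 0 ""
  let r := (PySem.List.slice clades (some 1) none).foldl
    (fun (st : String × List String) c =>
      let cur := PySem.Str.join dl [st.1, c]
      (cur, st.2 ++ [cur]))
    (cur, [cur])
  let prefixes := r.2
  let counts := prefixes.foldl (fun d p => d.modify p 0 (· + 1)) st.1
  let parents := PySem.Set.update st.2 (PySem.List.slice prefixes none (some (-1)))
  (counts, parents)

theorem funcA_eq (lsNames : List String) (dl : String) :
    funcGetTerminalNodesFromList lsNames dl =
      (lsNames.foldl (aStep dl) PySem.Dict.empty).keys.filter
        (fun s => (lsNames.foldl (aStep dl) PySem.Dict.empty).getD s false == true) := rfl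

theorem funcB_eq (lsNames : List String) (dl : String) :
    funcGetTerminalNodesFromList_alt lsNames dl =
      (lsNames.foldl (bStep dl) (PySem.Dict.empty, PySem.Set.empty)).1.keys.filter
        (fun p => (lsNames.foldl (bStep dl) (PySem.Dict.empty, PySem.Set.empty)).1.getD p 0 == 1 &&
          !((lsNames.foldl (bStep dl) (PySem.Dict.empty, PySem.Set.empty)).2.contains p)) := rfl

theorem ppfx_ne_nil (d cur : String) (rest : List String) : ppfx d cur rest ≠ [] := by
  cases rest <;> simp [ppfx]

theorem ppfx_eq_cons (d cur : String) (rest : List String) :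
    ppfx d cur rest = cur :: (ppfx d cur rest).drop 1 := by
  cases rest <;> simp [ppfx]

theorem len_lt_join (d a b : String) (h : b ≠ "") :
    a.toList.length < (PySem.Str.join d [a, b]).toList.length := by
  have he : (PySem.Str.join d [a, b]).toList = a.toList ++ d.toList ++ b.toList := by
    simp [PySem.Str.toList_join, PySem.Chars.join_cons_cons, PySem.Chars.join_singleton]
  rw [he]
  have hb : b.toList ≠ [] := fun hc => h (by
    have := congrArg String.ofList hc; simpa using this)
  have h2 := List.length_pos_iff.mpr hb
  simp only [List.length_append]; omega

theorem ppfx_len_le (d : String) :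
    ∀ (rest : List String) (cur : String), (∀ c ∈ rest, c ≠ "") →
      ∀ p ∈ ppfx d cur rest, cur.toList.length ≤ p.toList.length := by
  intro rest
  induction rest with
  | nil => intro cur _ p hp; simp [ppfx] at hp; subst hp; exact le_refl _
  | cons c r ih =>
    intro cur h p hp
    simp only [ppfx, List.mem_cons] at hp
    rcases hp with rfl | hp
    · exact le_refl _
    · have h1 : cur.toList.length < (PySem.Str.join d [cur, c]).toList.length :=
        len_lt_join d cur c (h c (by simp))
      have h2 := ih (PySem.Str.join d [cur, c]) (fun x hx => h x (by simp [hx])) p hp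
      omega

theorem lastP_mem (d : String) :
    ∀ (rest : List String) (cur : String), lastP d cur rest ∈ ppfx d cur rest := by
  intro rest
  induction rest with
  | nil => intro cur; simp [lastP, ppfx]
  | cons c r ih => intro cur; simp only [lastP, ppfx, List.mem_cons]; right; exact ih _

theorem ppfx_decomp (d : String) :
    ∀ (rest : List String) (cur : String),
      ppfx d cur rest = (ppfx d cur rest).dropLast ++ [lastP d cur rest] := by
  intro rest
  induction rest with
  | nil => intro cur; simp [ppfx, lastP]
  | cons c r ih =>
    intro cur
    simp only [ppfx, lastP]
    rw [List.dropLast_cons_of_ne_nil (ppfx_ne_nil _ _ _)]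
    rw [List.cons_append, ← ih]

theorem keys_insert_eq_add {ν : Type} (dd : PySem.Dict String ν) (k : String) (v : ν) :
    (dd.insert k v).keys = PySem.Set.add dd.keys k := by
  show _ = if List.contains dd.keys k then dd.keys else dd.keys ++ [k]
  by_cases h : dd.contains k = true
  · rw [PySem.Dict.keys_insert_of_contains dd v h]
    rw [if_pos (by simpa using (PySem.Dict.contains_iff_mem_keys dd k).mp h)]
  · have h' : dd.contains k = false := by simpa using h
    rw [PySem.Dict.keys_insert_of_not_contains dd v h']
    rw [if_neg (by simp; intro hm; exact h ((PySem.Dict.contains_iff_mem_keys dd k).mpr hm))]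

theorem lastP_len_gt (d : String) (rest : List String) (cur : String)
    (h : ∀ c ∈ rest, c ≠ "") (hne : rest ≠ []) :
    cur.toList.length < (lastP d cur rest).toList.length := by
  cases rest with
  | nil => exact absurd rfl hne
  | cons c r =>
    have h1 : cur.toList.length < (PySem.Str.join d [cur, c]).toList.length :=
      len_lt_join d cur c (h c (by simp))
    have h2 := ppfx_len_le d r (PySem.Str.join d [cur, c])
      (fun x hx => h x (by simp [hx])) _ (lastP_mem d r _)
    simp only [lastP]
    omega

theorem aInner_fold (dl : String) :
    ∀ (rest : List String) (cur : String) (dd : PySem.Dict String Bool),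
      (∀ c ∈ rest, c ≠ "") → dd.contains cur = true →
      (∀ k, (rest.foldl (aInner dl) (cur, dd)).2.get? k =
        if k ∈ (ppfx dl cur rest).dropLast then some false
        else if k = lastP dl cur rest ∧ rest ≠ [] then some (!dd.contains k)
        else dd.get? k)
      ∧ (rest.foldl (aInner dl) (cur, dd)).2.keys =
          PySem.Set.update dd.keys ((ppfx dl cur rest).drop 1) := by
  intro rest
  induction rest with
  | nil =>
    intro cur dd _ _
    exact ⟨fun k => by simp [ppfx, lastP], rfl⟩
  | cons c r ih =>
    intro cur dd h hc
    have hrest : ∀ x ∈ r, x ≠ "" := fun x hx => h x (by simp [hx])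
    have hcne : c ≠ "" := h c (by simp)
    have hq : cur.toList.length < (PySem.Str.join dl [cur, c]).toList.length :=
      len_lt_join dl cur c hcne
    set q := PySem.Str.join dl [cur, c] with hqdef
    have hqcur : q ≠ cur := fun he => by rw [he] at hq; omega
    have hcur_notin : ∀ p ∈ ppfx dl q r, cur ≠ p := by
      intro p hp he
      have := ppfx_len_le dl r q hrest p hp
      rw [← he] at this; omega
    have step1 : aInner dl (cur, dd) c =
        (q, (dd.insert q (!dd.contains q)).insert cur false) := by
      by_cases hg : dd.contains q = true <;> simp [aInner, hg, ← hqdef]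
    have hc2 : ((dd.insert q (!dd.contains q)).insert cur false).contains q = true := by
      simp [PySem.Dict.contains_insert]
    have hr := ih q ((dd.insert q (!dd.contains q)).insert cur false) hrest hc2
    rw [List.foldl_cons, step1]
    set dd2 := (dd.insert q (!dd.contains q)).insert cur false with hdd2
    have hget2 : ∀ x, dd2.get? x =
        if x = cur then some false else if x = q then some (!dd.contains q) else dd.get? x := by
      intro x
      rw [hdd2, PySem.Dict.get?_insert, PySem.Dict.get?_insert]
    have hcon2 : ∀ x, x ≠ cur → x ≠ q → dd2.contains x = dd.contains x := by
      intro x h1 h2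
      rw [hdd2, PySem.Dict.contains_insert, PySem.Dict.contains_insert]
      rw [show (x == cur) = false from beq_eq_false_iff_ne.mpr h1]
      rw [show (x == q) = false from beq_eq_false_iff_ne.mpr h2]
      simp
    constructor
    · intro k
      have hgoal_shape : (ppfx dl cur (c :: r)).dropLast =
          cur :: (ppfx dl q r).dropLast := by
        simp only [ppfx, ← hqdef]
        exact List.dropLast_cons_of_ne_nil (ppfx_ne_nil _ _ _)
      have hlast_shape : lastP dl cur (c :: r) = lastP dl q r := by
        simp only [lastP, ← hqdef]
      rw [hr.1 k]
      conv_rhs => rw [hgoal_shape, hlast_shape]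
      by_cases hk1 : k = cur
      · subst hk1
        have hdl : k ∉ (ppfx dl q r).dropLast :=
          fun hm => hcur_notin _ (List.mem_of_mem_dropLast hm) rfl
        have hlp : ¬(k = lastP dl q r ∧ r ≠ []) :=
          fun hx => hcur_notin _ (lastP_mem dl r q) hx.1
        conv_lhs => rw [if_neg hdl, if_neg hlp]
        conv_rhs => rw [if_pos (List.mem_cons_self)]
        rw [hget2]
        simp
      · by_cases hk2 : k ∈ (ppfx dl q r).dropLast
        · conv_lhs => rw [if_pos hk2]
          conv_rhs => rw [if_pos (List.mem_cons_of_mem _ hk2)]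
        · have hmem : k ∉ cur :: (ppfx dl q r).dropLast := by
            simp [List.mem_cons, hk1, hk2]
          by_cases hk3 : k = lastP dl q r
          · cases r with
            | nil =>
              have hkq : k = q := by simpa [lastP] using hk3
              have hc1 : ¬(k = lastP dl q [] ∧ ([] : List String) ≠ []) := by simp
              conv_lhs =>
                rw [if_neg (show k ∉ (ppfx dl q []).dropLast by simp [ppfx]), if_neg hc1]
              conv_rhs => rw [if_neg hmem, if_pos ⟨hk3, by simp⟩]
              rw [hget2, if_neg hk1, if_pos hkq, hkq]
            | cons c' r' =>
              have hkq : k ≠ q := by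
                intro he
                have hgt := lastP_len_gt dl (c' :: r') q hrest (by simp)
                rw [← hk3, he] at hgt
                omega
              conv_lhs => rw [if_neg hk2, if_pos ⟨hk3, by simp⟩]
              conv_rhs => rw [if_neg hmem, if_pos ⟨hk3, by simp⟩]
              rw [hcon2 k hk1 hkq]
          · have hkq : k ≠ q := by
              cases r with
              | nil => intro he; exact hk3 (by simp [lastP, he])
              | cons c' r' =>
                intro he
                apply hk2
                rw [he]
                simp only [ppfx]
                rw [List.dropLast_cons_of_ne_nil (ppfx_ne_nil _ _ _)]
                simp
            conv_lhs =>
              rw [if_neg hk2, if_neg (show ¬(k = lastP dl q r ∧ r ≠ []) from fun hx => hk3 hx.1)]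
            conv_rhs =>
              rw [if_neg hmem,
                if_neg (show ¬(k = lastP dl q r ∧ (c :: r) ≠ []) from fun hx => hk3 hx.1)]
            rw [hget2, if_neg hk1, if_neg hkq]
    · rw [hr.2]
      have hkeys2 : dd2.keys = PySem.Set.add dd.keys q := by
        rw [hdd2]
        rw [PySem.Dict.keys_insert_of_contains _ false
          (by simp [PySem.Dict.contains_insert, hc])]
        exact keys_insert_eq_add dd q _
      rw [hkeys2]
      have h1 : (ppfx dl cur (c :: r)).drop 1 = ppfx dl q r := by
        simp [ppfx, ← hqdef]
      rw [h1]
      rw [ppfx_eq_cons dl q r]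
      simp [PySem.Set.update_eq_foldl]

theorem clades_ne_empty (dl name : String) : ∀ c ∈ (cladesOf dl name).drop 1, c ≠ "" := by
  intro c hc
  have := List.mem_of_mem_drop hc
  simp [cladesOf, List.mem_filter] at this
  exact this.2

theorem aStep_eq (dl name : String) (dd : PySem.Dict String Bool) :
    aStep dl dd name =
      (((cladesOf dl name).drop 1).foldl (aInner dl)
        (headCl dl name,
         dd.insert (headCl dl name) (!dd.contains (headCl dl name)))).2 := by
  have ha : aStep dl dd name =
      (if ((cladesOf dl name).length : Int) < 2 then
        dd.insert (headCl dl name) (!dd.contains (headCl dl name))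
      else ((PySem.List.pyRange 1 ((cladesOf dl name).length : Int) 1).foldl
        (fun (st : String × PySem.Dict String Bool) iIndex =>
          aInner dl st (PySem.List.pyGetD (cladesOf dl name) iIndex ""))
        (headCl dl name,
         dd.insert (headCl dl name) (!dd.contains (headCl dl name)))).2) := rfl
  rw [ha]
  by_cases hlen : ((cladesOf dl name).length : Int) < 2
  · rw [if_pos hlen]
    have hd : (cladesOf dl name).drop 1 = [] := List.drop_eq_nil_of_le (by omega)
    rw [hd]
    rfl
  · rw [if_neg hlen]
    rw [PySem.List.foldl_pyRange_pyGetD' (cladesOf dl name) "" (aInner dl) _ (by norm_num)]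
    norm_num

theorem aInner_fold2 (dl : String) (rest : List String) (cur : String)
    (dd : PySem.Dict String Bool) (h : ∀ c ∈ rest, c ≠ "") :
    (∀ k, (rest.foldl (aInner dl) (cur, dd.insert cur (!dd.contains cur))).2.get? k =
      if k ∈ (ppfx dl cur rest).dropLast then some false
      else if k = lastP dl cur rest then some (!dd.contains k)
      else dd.get? k)
    ∧ (rest.foldl (aInner dl) (cur, dd.insert cur (!dd.contains cur))).2.keys =
        PySem.Set.update dd.keys (ppfx dl cur rest) := by
  have hz := aInner_fold dl rest cur (dd.insert cur (!dd.contains cur)) h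
    (PySem.Dict.contains_insert_self _ _ _)
  constructor
  · intro k
    rw [hz.1 k]
    by_cases hmem : k ∈ (ppfx dl cur rest).dropLast
    · conv_lhs => rw [if_pos hmem]
      conv_rhs => rw [if_pos hmem]
    · conv_lhs => rw [if_neg hmem]
      conv_rhs => rw [if_neg hmem]
      by_cases hkl : k = lastP dl cur rest
      · cases rest with
        | nil =>
          have hk0 : k = cur := by simpa [lastP] using hkl
          conv_lhs => rw [if_neg (by simp)]
          conv_rhs => rw [if_pos hkl]
          rw [PySem.Dict.get?_insert, if_pos hk0, hk0]
        | cons c' r' =>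
          have hk0 : k ≠ cur := by
            intro he
            have hgt := lastP_len_gt dl (c' :: r') cur h (by simp)
            rw [← hkl, he] at hgt
            omega
          conv_lhs => rw [if_pos ⟨hkl, by simp⟩]
          conv_rhs => rw [if_pos hkl]
          rw [PySem.Dict.contains_insert]
          rw [show (k == cur) = false from beq_eq_false_iff_ne.mpr hk0]
          simp
      · have hk0 : k ≠ cur := by
          intro he
          cases rest with
          | nil => exact hkl (by simp [lastP, he])
          | cons c' r' =>
            apply hmem
            rw [he]
            simp only [ppfx]
            rw [List.dropLast_cons_of_ne_nil (ppfx_ne_nil _ _ _)]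
            simp
        conv_lhs => rw [if_neg (fun hx => hkl hx.1)]
        conv_rhs => rw [if_neg hkl]
        rw [PySem.Dict.get?_insert, if_neg hk0]
  · rw [hz.2, keys_insert_eq_add]
    rw [ppfx_eq_cons dl cur rest]
    simp [PySem.Set.update_eq_foldl]

theorem aStep_char (dl name : String) (dd : PySem.Dict String Bool) :
    (∀ k, (aStep dl dd name).get? k =
      if k ∈ (psOf dl name).dropLast then some false
      else if k = lastOf dl name then some (!dd.contains k)
      else dd.get? k)
    ∧ (aStep dl dd name).keys = PySem.Set.update dd.keys (psOf dl name) := by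
  rw [aStep_eq dl name dd]
  exact aInner_fold2 dl ((cladesOf dl name).drop 1) (headCl dl name) dd
    (clades_ne_empty dl name)

theorem dedup_append_update (L X : List String) :
    PySem.List.dedup (L ++ X) = PySem.Set.update (PySem.List.dedup L) X := by
  rw [PySem.List.dedup_eq_ofList, PySem.List.dedup_eq_ofList]
  rw [PySem.Set.ofList_eq_foldl, PySem.Set.ofList_eq_foldl, PySem.Set.update_eq_foldl]
  rw [List.foldl_append]

theorem psOf_decomp (dl n : String) :
    psOf dl n = (psOf dl n).dropLast ++ [lastOf dl n] :=
  ppfx_decomp dl ((cladesOf dl n).drop 1) (headCl dl n)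

theorem lastOf_mem (dl n : String) : lastOf dl n ∈ psOf dl n :=
  lastP_mem dl ((cladesOf dl n).drop 1) (headCl dl n)

theorem aOuter (dl : String) :
    ∀ (names : List String) (dd : PySem.Dict String Bool) (L P : List String),
      (∀ k, dd.get? k =
        if k ∈ L then some (decide (L.count k = 1) && !decide (k ∈ P)) else none) →
      dd.keys = PySem.List.dedup L →
      (∀ k ∈ P, k ∈ L) →
      (∀ k, (names.foldl (aStep dl) dd).get? k =
        if k ∈ L ++ names.flatMap (psOf dl) then
          some (decide ((L ++ names.flatMap (psOf dl)).count k = 1) &&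
            !decide (k ∈ P ++ names.flatMap (fun n => (psOf dl n).dropLast)))
        else none)
      ∧ (names.foldl (aStep dl) dd).keys = PySem.List.dedup (L ++ names.flatMap (psOf dl)) := by
  intro names
  induction names with
  | nil =>
    intro dd L P h1 h2 _
    constructor
    · intro k; rw [List.foldl_nil, h1 k]; simp
    · simpa using h2
  | cons n ns ih =>
    intro dd L P h1 h2 h3
    rw [List.foldl_cons]
    have hstep := aStep_char dl n dd
    have h1' : ∀ k, (aStep dl dd n).get? k =
        if k ∈ L ++ psOf dl n then
          some (decide ((L ++ psOf dl n).count k = 1) &&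
            !decide (k ∈ P ++ (psOf dl n).dropLast))
        else none := by
      intro k
      rw [hstep.1 k]
      by_cases hdl : k ∈ (psOf dl n).dropLast
      · rw [if_pos hdl,
          if_pos (by exact List.mem_append_right L (List.mem_of_mem_dropLast hdl))]
        have hp : decide (k ∈ P ++ (psOf dl n).dropLast) = true := by simp [hdl]
        rw [hp]
        simp
      · rw [if_neg hdl]
        by_cases hkl : k = lastOf dl n
        · have hkps : k ∈ psOf dl n := by rw [hkl]; exact lastOf_mem dl n
          rw [if_pos hkl, if_pos (List.mem_append_right L hkps)]
          have hcnt : (psOf dl n).count k = 1 := by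
            conv_lhs => rw [psOf_decomp dl n]
            rw [List.count_append, List.count_eq_zero.mpr hdl, hkl]
            simp
          rw [PySem.Dict.contains_eq_decide_mem_keys, h2]
          rw [List.count_append, hcnt]
          have hPm : (k ∈ P ++ (psOf dl n).dropLast) ↔ k ∈ P := by simp [hdl]
          by_cases hkL : k ∈ L
          · have hc1 : 0 < L.count k := List.count_pos_iff.mpr hkL
            have hd1 : decide (k ∈ PySem.List.dedup L) = true := by
              simp [hkL]
            rw [hd1]
            have hd2 : decide (L.count k + 1 = 1) = false := by
              simp; omega
            rw [hd2]
            simp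
          · have hd1 : decide (k ∈ PySem.List.dedup L) = false := by
              simp [hkL]
            rw [hd1]
            have hd2 : decide (L.count k + 1 = 1) = true := by
              simp [List.count_eq_zero.mpr hkL]
            rw [hd2]
            have hd3 : decide (k ∈ P ++ (psOf dl n).dropLast) = false := by
              simp only [decide_eq_false_iff_not, hPm]
              exact fun hp => hkL (h3 k hp)
            rw [hd3]
            simp
        · have hkps : k ∉ psOf dl n := by
            intro hm
            rw [psOf_decomp dl n] at hm
            rcases List.mem_append.mp hm with hm | hm
            · exact hdl hm
            · exact hkl (by simpa using hm)
          rw [if_neg hkl, h1 k]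
          have hcnt : (L ++ psOf dl n).count k = L.count k := by
            rw [List.count_append, List.count_eq_zero.mpr hkps, Nat.add_zero]
          have hPm : (k ∈ P ++ (psOf dl n).dropLast) ↔ k ∈ P := by
            simp only [List.mem_append]
            exact or_iff_left (fun hm => hkps (List.mem_of_mem_dropLast hm))
          have hLm : (k ∈ L ++ psOf dl n) ↔ k ∈ L := by
            simp only [List.mem_append]
            exact or_iff_left hkps
          by_cases hkL : k ∈ L
          · rw [if_pos hkL, if_pos (hLm.mpr hkL), hcnt]
            have : decide (k ∈ P ++ (psOf dl n).dropLast) = decide (k ∈ P) :=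
              decide_eq_decide.mpr hPm
            rw [this]
          · rw [if_neg hkL, if_neg (fun hm => hkL (hLm.mp hm))]
    have h2' : (aStep dl dd n).keys = PySem.List.dedup (L ++ psOf dl n) := by
      rw [hstep.2, h2, dedup_append_update]
    have h3' : ∀ k ∈ P ++ (psOf dl n).dropLast, k ∈ L ++ psOf dl n := by
      intro k hk
      rcases List.mem_append.mp hk with hk | hk
      · exact List.mem_append_left _ (h3 k hk)
      · exact List.mem_append_right _ (List.mem_of_mem_dropLast hk)
    have hres := ih (aStep dl dd n) (L ++ psOf dl n) (P ++ (psOf dl n).dropLast) h1' h2' h3'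
    constructor
    · intro k
      rw [hres.1 k]
      simp [List.flatMap_cons, List.append_assoc]
    · rw [hres.2]
      simp [List.flatMap_cons, List.append_assoc]

theorem bfold (dl : String) :
    ∀ (rest : List String) (cur : String) (acc : List String),
      rest.foldl (fun (st : String × List String) c =>
          (PySem.Str.join dl [st.1, c], st.2 ++ [PySem.Str.join dl [st.1, c]])) (cur, acc)
        = (lastP dl cur rest, acc ++ (ppfx dl cur rest).drop 1) := by
  intro rest
  induction rest with
  | nil => intro cur acc; simp [ppfx, lastP]
  | cons c r ih =>
    intro cur acc
    rw [List.foldl_cons]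
    show (r.foldl _ (PySem.Str.join dl [cur, c], acc ++ [PySem.Str.join dl [cur, c]])) = _
    rw [ih]
    simp only [lastP, ppfx, List.drop_succ_cons, List.drop_zero]
    rw [ppfx_eq_cons dl (PySem.Str.join dl [cur, c]) r]
    simp

theorem bStep_char (dl name : String) (st : PySem.Dict String Int × PySem.Set String) :
    bStep dl st name =
      ((psOf dl name).foldl (fun d p => d.modify p 0 (· + 1)) st.1,
       PySem.Set.update st.2 ((psOf dl name).dropLast)) := by
  have hsl : PySem.List.slice (cladesOf dl name) (some 1) none = (cladesOf dl name).drop 1 := by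
    rw [PySem.List.slice_from_one, List.drop_one]
  have hpre : (PySem.List.slice (cladesOf dl name) (some 1) none).foldl
      (fun (st : String × List String) c =>
        (PySem.Str.join dl [st.1, c], st.2 ++ [PySem.Str.join dl [st.1, c]]))
      (headCl dl name, [headCl dl name])
      = (lastOf dl name, psOf dl name) := by
    rw [hsl, bfold dl ((cladesOf dl name).drop 1) (headCl dl name) [headCl dl name]]
    unfold lastOf psOf
    rw [ppfx_eq_cons dl (headCl dl name) ((cladesOf dl name).drop 1)]
    simp
  have hb : bStep dl st name =
      (((PySem.List.slice (cladesOf dl name) (some 1) none).foldl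
          (fun (st : String × List String) c =>
            (PySem.Str.join dl [st.1, c], st.2 ++ [PySem.Str.join dl [st.1, c]]))
          (headCl dl name, [headCl dl name])).2.foldl
            (fun d p => d.modify p 0 (· + 1)) st.1,
       PySem.Set.update st.2 (PySem.List.slice
          ((PySem.List.slice (cladesOf dl name) (some 1) none).foldl
            (fun (st : String × List String) c =>
              (PySem.Str.join dl [st.1, c], st.2 ++ [PySem.Str.join dl [st.1, c]]))
            (headCl dl name, [headCl dl name])).2 none (some (-1)))) := rfl
  rw [hb, hpre]
  rw [PySem.List.slice_to_neg_one]

theorem bOuter (dl : String) :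
    ∀ (names : List String) (st : PySem.Dict String Int × PySem.Set String) (L P : List String),
      (∀ k, st.1.getD k 0 = (L.count k : Int)) →
      st.1.keys = PySem.List.dedup L →
      st.2 = PySem.Set.ofList P →
      (∀ k, (names.foldl (bStep dl) st).1.getD k 0 = ((L ++ names.flatMap (psOf dl)).count k : Int))
      ∧ (names.foldl (bStep dl) st).1.keys = PySem.List.dedup (L ++ names.flatMap (psOf dl))
      ∧ (names.foldl (bStep dl) st).2 =
          PySem.Set.ofList (P ++ names.flatMap (fun n => (psOf dl n).dropLast)) := by
  intro names
  induction names with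
  | nil =>
    intro st L P h1 h2 h3
    refine ⟨fun k => by rw [List.foldl_nil, h1 k]; simp, by simpa using h2, by simpa using h3⟩
  | cons n ns ih =>
    intro st L P h1 h2 h3
    rw [List.foldl_cons, bStep_char]
    have h1' : ∀ k, ((psOf dl n).foldl (fun d p => d.modify p 0 (· + 1)) st.1).getD k 0 =
        ((L ++ psOf dl n).count k : Int) := by
      intro k
      rw [PySem.Dict.getD_foldl_modify_add_one, h1 k, List.count_append]
      push_cast
      ring
    have h2' : ((psOf dl n).foldl (fun d p => d.modify p 0 (· + 1)) st.1).keys =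
        PySem.List.dedup (L ++ psOf dl n) := by
      rw [PySem.Dict.keys_foldl_modify, h2, dedup_append_update]
    have h3' : PySem.Set.update st.2 ((psOf dl n).dropLast) =
        PySem.Set.ofList (P ++ (psOf dl n).dropLast) := by
      rw [h3, PySem.Set.update_eq_foldl, PySem.Set.ofList_eq_foldl,
        PySem.Set.ofList_eq_foldl, List.foldl_append]
    have hres := ih ((psOf dl n).foldl (fun d p => d.modify p 0 (· + 1)) st.1,
      PySem.Set.update st.2 ((psOf dl n).dropLast)) (L ++ psOf dl n)
      (P ++ (psOf dl n).dropLast) h1' h2' h3'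
    refine ⟨fun k => ?_, ?_, ?_⟩
    · rw [hres.1 k]
      simp [List.flatMap_cons, List.append_assoc]
    · rw [hres.2.1]
      simp [List.flatMap_cons, List.append_assoc]
    · rw [hres.2.2]
      simp [List.flatMap_cons, List.append_assoc]

theorem contains_ofList_eq (P : List String) (s : String) :
    PySem.Set.contains (PySem.Set.ofList P) s = decide (s ∈ P) := by
  by_cases h : s ∈ P <;> simp [PySem.Set.contains, h]

-- ===== VERDICT (by name: the statement is the Claim_ definition above) =====
theorem funcGetTerminalNodesFromList_spec : Claim_equal_funcGetTerminalNodesFromList := by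
  unfold Claim_equal_funcGetTerminalNodesFromList
  intro lsNames dl _ _
  unfold Spec_funcGetTerminalNodesFromList
  rw [funcA_eq, funcB_eq]
  have hA := aOuter dl lsNames PySem.Dict.empty [] []
    (fun k => by simp [PySem.Dict.get?_empty]) (by simp) (by simp)
  have hB := bOuter dl lsNames (PySem.Dict.empty, PySem.Set.empty) [] []
    (fun k => by simp [PySem.Dict.getD_empty]) (by simp) rfl
  simp only [List.nil_append] at hA hB
  rw [hA.2, hB.2.1]
  apply List.filter_congr
  intro s hs
  have hsL : s ∈ lsNames.flatMap (psOf dl) := (PySem.List.mem_dedup _ _).mp hs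
  have hga := hA.1 s
  rw [if_pos hsL] at hga
  rw [PySem.Dict.getD_eq_get?_getD, hga, hB.1 s, hB.2.2, contains_ofList_eq]
  by_cases h1 : (lsNames.flatMap (psOf dl)).count s = 1 <;>
    by_cases h2 : s ∈ lsNames.flatMap (fun n => (psOf dl n).dropLast) <;>
    simp [h1, h2]
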